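-- pv_equiv track=rewrite | github.com/sungyeong98/study | practice/monthly_code_challenge_season_3.py | solution
-- ===== SOURCE A (Python) =====
-- def solution(n,m,x,y,queries):
--     min_x,max_x,min_y,max_y=x,x,y,y
--     #쿼리를 역으로 접근하여 시도하였다.
--     for query,move in queries[::-1]:
--         #원래는 좌측으로 이동하는 쿼리이기 때문에, 우측(y)으로 이동시킨다.
--         if query==0:
--             #우측 이동이기 때문에 y의 max값을 변경해준다.
--             max_y+=move
--             #만약 y가 격자의 크기를 벗어났다면, m의 값을 넣어준다.
--             if max_y>=m:
--                 max_y=m-1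
--             #이 경우가 중요한데, 만약 y가 왼쪽 벽에 붙어있었다면 역으로 도출했을때 가능한 위치가 이동크기만큼이 된다.
--             #예시로 y가 0이고 쿼리에서 왼쪽으로 3만큼 이동하라고 했을때, 역으로 계산한다면
--             #y는 0부터 3의 위치를 가질 수 있다. 이는 문제에서 명시한 공의 이동조건에 따른 것이다.
--             #즉, 벽에 붙어있을 경우는 값을 갱신할 필요가 없다.
--             #아래의 조건은 벽에 붙어 있지 않은 경우를 말하고 있는 것으로, y의 최소값도 같이 변경시켜주었다.
--             #해당 연산으로 y의 최솟값이 격자의 크기를 벗어날 수 있긴 하지만 그런 경우는 애초에 공의 시작점이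
--             #존재하지 않는 경우가 될 것이기 때문에 전혀 문제가 없다.
--             if min_y!=0:
--                 min_y+=move
--         #우측이동 명령이기 때문에, 좌측으로 이동시킨다.
--         elif query==1:
--             min_y-=move
--             if min_y<0:
--                 min_y=0
--             if max_y!=m-1:
--                 max_y-=move
--         #위쪽이동 명령이기 때문에, 아래로 이동시킨다.
--         elif query==2:
--             max_x+=move
--             if max_x>=n:
--                 max_x=n-1
--             if min_x!=0:
--                 min_x+=move
--         #아래쪽이동 명령이기 때문에, 위로 이동시킨다.
--         elif query==3:
--             min_x-=move
--             if min_x<0: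
--                 min_x=0
--             if max_x!=n-1:
--                 max_x-=move
--     #값들이 범위를 벗어났다는 것은 시작점이 존재하지 않는다는 것으로 0을 반환해준다.
--     if min_x>n or min_y>m or max_x<0 or max_y<0:
--         return 0
--     #그렇지 않은 경우는 최소최대값을 통해 사각형의 넓이를 구해주어 반환해주면 시작점의 갯수가 된다.
--     return (max_x-min_x+1)*(max_y-min_y+1)
-- ===== SOURCE B (Python) =====
-- def _axis(size, coord, moves):
--     # moves: list of (plus, move) in the order they should be replayed (already reversed)
--     lo = hi = coord
--     for plus, move in moves:
--         if plus:
--             hi += move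
--             if hi >= size:
--                 hi = size - 1
--             if lo != 0:
--                 lo += move
--         else:
--             lo -= move
--             if lo < 0:
--                 lo = 0
--             if hi != size - 1:
--                 hi -= move
--     return lo, hi
--
-- def solution(n, m, x, y, queries):
--     rev = queries[::-1]
--     xs = [(q == 2, mv) for q, mv in rev if q == 2 or q == 3]
--     ys = [(q == 0, mv) for q, mv in rev if q == 0 or q == 1]
--     lx, hx = _axis(n, x, xs)
--     ly, hy = _axis(m, y, ys)
--     if lx > n or ly > m or hx < 0 or hy < 0:
--         return 0
--     return (hx - lx + 1) * (hy - ly + 1)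
-- ===== Notes on version B (the rewrite author's own statement) =====
-- stated objective: simpler
-- what changed: B replaces A's four-branch interleaved update of (min_x,max_x,min_y,max_y) by splitting the reversed queries per axis and running one shared 1-D bound-tracking helper twice, once per axis.
import Mathlib
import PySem

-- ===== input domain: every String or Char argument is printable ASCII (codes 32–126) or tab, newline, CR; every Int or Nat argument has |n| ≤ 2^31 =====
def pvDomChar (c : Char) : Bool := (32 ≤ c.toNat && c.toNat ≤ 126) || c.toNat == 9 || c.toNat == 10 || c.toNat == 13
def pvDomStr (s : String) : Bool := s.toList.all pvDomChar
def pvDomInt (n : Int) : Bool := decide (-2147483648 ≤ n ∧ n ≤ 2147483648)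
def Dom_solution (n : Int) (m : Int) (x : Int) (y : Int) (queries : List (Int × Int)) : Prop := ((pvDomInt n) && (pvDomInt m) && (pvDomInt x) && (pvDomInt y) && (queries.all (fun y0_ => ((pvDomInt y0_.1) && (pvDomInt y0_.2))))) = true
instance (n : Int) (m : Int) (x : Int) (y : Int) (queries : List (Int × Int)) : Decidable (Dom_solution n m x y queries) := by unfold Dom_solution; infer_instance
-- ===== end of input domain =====

-- B refactors A: instead of A's four-branch loop updating (min_x,max_x,min_y,max_y) at once,
-- B splits the reversed queries by axis and runs one shared 1-D bound-tracking helper per axis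
-- (objective: simpler decomposition; same cost).

-- ===== PORT A =====
-- state s = (min_x, max_x, min_y, max_y); one iteration of A's loop body.
def stepA (n m : Int) (s : Int × Int × Int × Int) (q : Int × Int) : Int × Int × Int × Int :=
  if q.1 == 0 then
    (s.1, s.2.1,
     (if s.2.2.1 != 0 then s.2.2.1 + q.2 else s.2.2.1),
     (if s.2.2.2 + q.2 ≥ m then m - 1 else s.2.2.2 + q.2))
  else if q.1 == 1 then
    (s.1, s.2.1,
     (if s.2.2.1 - q.2 < 0 then 0 else s.2.2.1 - q.2),
     (if s.2.2.2 != m - 1 then s.2.2.2 - q.2 else s.2.2.2))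
  else if q.1 == 2 then
    ((if s.1 != 0 then s.1 + q.2 else s.1),
     (if s.2.1 + q.2 ≥ n then n - 1 else s.2.1 + q.2),
     s.2.2.1, s.2.2.2)
  else if q.1 == 3 then
    ((if s.1 - q.2 < 0 then 0 else s.1 - q.2),
     (if s.2.1 != n - 1 then s.2.1 - q.2 else s.2.1),
     s.2.2.1, s.2.2.2)
  else s

-- queries[::-1] is List.reverse (exact for a full negative-step slice).
def solution (n : Int) (m : Int) (x : Int) (y : Int) (queries : List (Int × Int)) : Int :=
  let s := queries.reverse.foldl (stepA n m) (x, x, y, y)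
  if s.1 > n || s.2.2.1 > m || s.2.1 < 0 || s.2.2.2 < 0 then 0
  else (s.2.1 - s.1 + 1) * (s.2.2.2 - s.2.2.1 + 1)

-- ===== PORT B =====
-- s = (lo, hi); one step of Source B's _axis loop.
def axisStep (size : Int) (s : Int × Int) (pm : Bool × Int) : Int × Int :=
  if pm.1 then
    ((if s.1 != 0 then s.1 + pm.2 else s.1),
     (if s.2 + pm.2 ≥ size then size - 1 else s.2 + pm.2))
  else
    ((if s.1 - pm.2 < 0 then 0 else s.1 - pm.2),
     (if s.2 != size - 1 then s.2 - pm.2 else s.2))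

def axis (size : Int) (coord : Int) (moves : List (Bool × Int)) : Int × Int :=
  moves.foldl (axisStep size) (coord, coord)

def solution_alt (n : Int) (m : Int) (x : Int) (y : Int) (queries : List (Int × Int)) : Int :=
  let rev := queries.reverse
  let xs := (rev.filter (fun p => p.1 == 2 || p.1 == 3)).map (fun p => (p.1 == 2, p.2))
  let ys := (rev.filter (fun p => p.1 == 0 || p.1 == 1)).map (fun p => (p.1 == 0, p.2))
  let px := axis n x xs
  let py := axis m y ys
  if px.1 > n || py.1 > m || px.2 < 0 || py.2 < 0 then 0
  else (px.2 - px.1 + 1) * (py.2 - py.1 + 1)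

-- ===== PRECONDITION & SPEC =====
def Spec_solution (n : Int) (m : Int) (x : Int) (y : Int) (queries : List (Int × Int)) (out : Int) : Prop := out = solution_alt n m x y queries
instance (n : Int) (m : Int) (x : Int) (y : Int) (queries : List (Int × Int)) (out : Int) : Decidable (Spec_solution n m x y queries out) := by unfold Spec_solution; infer_instance

-- ===== CLAIM (what is proved, stated in full; the proofs are below) =====
def Claim_equal_solution : Prop := ∀ (n : Int) (m : Int) (x : Int) (y : Int) (queries : List (Int × Int)), Dom_solution n m x y queries → Spec_solution n m x y queries (solution n m x y queries)

-- ===== LEMMAS AND PROOFS =====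

-- A's interleaved fold equals the two independent per-axis folds of B.
theorem fold_split (n m : Int) : ∀ (l : List (Int × Int)) (a b c d : Int),
    l.foldl (stepA n m) (a, b, c, d) =
      ( (((l.filter (fun p => p.1 == 2 || p.1 == 3)).map (fun p => (p.1 == 2, p.2))).foldl (axisStep n) (a, b)).1,
        (((l.filter (fun p => p.1 == 2 || p.1 == 3)).map (fun p => (p.1 == 2, p.2))).foldl (axisStep n) (a, b)).2,
        (((l.filter (fun p => p.1 == 0 || p.1 == 1)).map (fun p => (p.1 == 0, p.2))).foldl (axisStep m) (c, d)).1,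
        (((l.filter (fun p => p.1 == 0 || p.1 == 1)).map (fun p => (p.1 == 0, p.2))).foldl (axisStep m) (c, d)).2 ) := by
  intro l
  induction l with
  | nil => intro a b c d; rfl
  | cons q t ih =>
    intro a b c d
    by_cases h0 : q.1 = 0
    · simp [stepA, axisStep, h0, ih]
    · by_cases h1 : q.1 = 1
      · simp [stepA, axisStep, h1, ih]
      · by_cases h2 : q.1 = 2
        · simp [stepA, axisStep, h2, ih]
        · by_cases h3 : q.1 = 3
          · simp [stepA, axisStep, h3, ih]
          · simp [stepA, h0, h1, h2, h3, ih]

-- ===== VERDICT (by name: the statement is the Claim_ definition above) =====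
theorem solution_spec : Claim_equal_solution := by
  intro n m x y queries _
  unfold Spec_solution solution solution_alt axis
  rw [fold_split]
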